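-- pv_equiv track=rewrite | github.com/atapia27/TVScriptor | TvScriptor.py | charPerLine
-- ===== SOURCE A (Python) =====
-- def charPerLine(my_text):
--     line_char = {}
--     counter = 1
--     curr_char_sum = 0
--     # split the string into lines
--     lines = my_text.split('\n')
--
--     # iterate through the lines
--     for line in lines:
--         line_char[counter] = curr_char_sum
--         curr_char_sum += len(line)+1
--         counter += 1
--
--     return line_char
-- ===== SOURCE B (Python) =====
-- def charPerLine(my_text):
--     # Line k starts right after the (k-1)th newline: record newline positions directly.
--     line_char = {1: 0}
--     next_line = 2
--     for i, ch in enumerate(my_text):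
--         if ch == '\n':
--             line_char[next_line] = i + 1
--             next_line += 1
--     return line_char
-- ===== Notes on version B (the rewrite author's own statement) =====
-- stated objective: alternative
-- what changed: Instead of splitting into lines and keeping a running sum of line lengths, B scans the raw string once and records each newline's index+1 as the next line's start offset (newline-position indexing, no split and no length arithmetic).
import Mathlib
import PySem

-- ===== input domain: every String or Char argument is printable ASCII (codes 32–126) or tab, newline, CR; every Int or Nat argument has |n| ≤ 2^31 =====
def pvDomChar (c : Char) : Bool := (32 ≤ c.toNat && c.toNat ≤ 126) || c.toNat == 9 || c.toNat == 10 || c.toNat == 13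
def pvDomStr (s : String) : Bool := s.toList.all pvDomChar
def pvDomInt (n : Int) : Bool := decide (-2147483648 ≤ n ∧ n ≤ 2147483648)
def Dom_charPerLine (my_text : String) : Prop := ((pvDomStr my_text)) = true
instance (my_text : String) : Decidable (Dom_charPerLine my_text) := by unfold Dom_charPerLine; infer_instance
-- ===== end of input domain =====

-- B replaces A's split-lines-and-sum-lengths loop by a single scan over the raw characters that records each newline's index+1 as the next line's start (alternative algorithm, same cost).


-- ===== PORT A =====
def charPerLine (my_text : String) : List (Int × Int) :=
  let lines := (PySem.Str.split? my_text "\n").getD []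
  let st := lines.foldl
    (fun (st : PySem.Dict Int Int × Int × Int) line =>
      (st.1.insert st.2.1 st.2.2, st.2.1 + 1, st.2.2 + (PySem.Str.len line + 1)))
    (PySem.Dict.empty, 1, 0)
  st.1.items

-- ===== PORT B =====
def charPerLine_alt (my_text : String) : List (Int × Int) :=
  let st := (PySem.List.enumerate my_text.toList 0).foldl
    (fun (st : PySem.Dict Int Int × Int) p =>
      if p.2 = '\n' then (st.1.insert st.2 (p.1 + 1), st.2 + 1) else st)
    (((PySem.Dict.empty : PySem.Dict Int Int).insert 1 0), 2)
  st.1.items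

-- ===== PRECONDITION & SPEC =====
def Spec_charPerLine (my_text : String) (out : List (Int × Int)) : Prop := out = charPerLine_alt my_text
instance (my_text : String) (out : List (Int × Int)) : Decidable (Spec_charPerLine my_text out) := by unfold Spec_charPerLine; infer_instance

-- ===== CLAIM (what is proved, stated in full; the proofs are below) =====
def Claim_equal_charPerLine : Prop := ∀ (my_text : String), Dom_charPerLine my_text → Spec_charPerLine my_text (charPerLine my_text)

-- ===== LEMMAS AND PROOFS =====

/-- Reference split on '\n' (structural recursion). -/
def pvSplitNL : List Char → List (List Char)
  | [] => [[]]
  | c :: rest => if c = '\n' then [] :: pvSplitNL rest else (pvSplitNL rest).modifyHead (c :: ·)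

lemma pvSplitNL_ne_nil (cs : List Char) : pvSplitNL cs ≠ [] := by
  cases cs with
  | nil => simp [pvSplitNL]
  | cons c rest =>
    simp only [pvSplitNL]
    split_ifs
    · simp
    · cases h : pvSplitNL rest with
      | nil => exact absurd h (pvSplitNL_ne_nil rest)
      | cons a as => simp [List.modifyHead]

/-- A's closed form: pairs (line number, offset) for the given spans. -/
def pvSpec (spans : List Int) (c s : Int) : List (Int × Int) :=
  match spans with
  | [] => []
  | sp :: rest => (c, s) :: pvSpec rest (c + 1) (s + sp)

/-- B's closed form: one pair per newline, mapping line number to index+1. -/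
def pvScan (ps : List (Int × Char)) (n : Int) : List (Int × Int) :=
  match ps with
  | [] => []
  | p :: rest => if p.2 = '\n' then (n, p.1 + 1) :: pvScan rest (n + 1) else pvScan rest n

lemma pvA_loop (lines : List String) (d : PySem.Dict Int Int) (c s : Int)
    (h : ∀ k ∈ d.keys, k < c) :
    ((lines.foldl
      (fun (st : PySem.Dict Int Int × Int × Int) line =>
        (st.1.insert st.2.1 st.2.2, st.2.1 + 1, st.2.2 + (PySem.Str.len line + 1)))
      (d, c, s)).1).items
      = d.items ++ pvSpec (lines.map (fun l => PySem.Str.len l + 1)) c s := by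
  induction lines generalizing d c s with
  | nil => simp [pvSpec]
  | cons l ls ih =>
    have hnc : d.contains c = false := by
      by_contra hc
      have := (PySem.Dict.contains_iff_mem_keys d c).mp (by
        cases hcc : d.contains c
        · exact absurd hcc hc
        · rfl)
      exact absurd (h c this) (lt_irrefl c)
    simp only [List.foldl_cons, List.map_cons, pvSpec]
    rw [ih (d.insert c s) (c + 1) (s + (PySem.Str.len l + 1))
      (by
        intro k hk
        rcases (PySem.Dict.mem_keys_insert d c k s).mp hk with rfl | hk'
        · omega
        · have := h k hk'; omega)]
    rw [PySem.Dict.items_insert_of_not_contains d s hnc]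
    simp

lemma pvB_loop (ps : List (Int × Char)) (d : PySem.Dict Int Int) (n : Int)
    (h : ∀ k ∈ d.keys, k < n) :
    ((ps.foldl
      (fun (st : PySem.Dict Int Int × Int) p =>
        if p.2 = '\n' then (st.1.insert st.2 (p.1 + 1), st.2 + 1) else st)
      (d, n)).1).items
      = d.items ++ pvScan ps n := by
  induction ps generalizing d n with
  | nil => simp [pvScan]
  | cons p rest ih =>
    simp only [List.foldl_cons, pvScan]
    by_cases hp : p.2 = '\n'
    · have hnc : d.contains n = false := by
        by_contra hc
        have := (PySem.Dict.contains_iff_mem_keys d n).mp (by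
          cases hcc : d.contains n
          · exact absurd hcc hc
          · rfl)
        exact absurd (h n this) (lt_irrefl n)
      rw [if_pos hp, if_pos hp,
        ih (d.insert n (p.1 + 1)) (n + 1)
          (by
            intro k hk
            rcases (PySem.Dict.mem_keys_insert d n k (p.1 + 1)).mp hk with rfl | hk'
            · omega
            · have := h k hk'; omega)]
      rw [PySem.Dict.items_insert_of_not_contains d (p.1 + 1) hnc]
      simp
    · rw [if_neg hp, if_neg hp, ih d n h]

/-- The fuel-based PySem splitter agrees with the structural reference splitter. -/
lemma pvGo_eq (cs : List Char) (fuel : Nat) (cur : List Char) (acc : List (List Char))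
    (hf : cs.length < fuel) :
    PySem.Chars.splitOn.go ['\n'] fuel cs cur acc
      = acc.reverse ++ (pvSplitNL cs).modifyHead (cur.reverse ++ ·) := by
  induction fuel generalizing cs cur acc with
  | zero => omega
  | succ fuel ih =>
    cases cs with
    | nil =>
      simp [PySem.Chars.splitOn.go, pvSplitNL]
    | cons c rest =>
      simp only [PySem.Chars.splitOn.go]
      by_cases hc : c = '\n'
      · rw [if_pos (by simp [hc, List.isPrefixOf])]
        simp only [List.length_cons, List.length_nil, List.drop_succ_cons, List.drop_zero]
        rw [ih rest [] (cur.reverse :: acc) (by simp at hf ⊢; omega)]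
        have : (pvSplitNL rest).modifyHead (List.nil.reverse ++ ·) = pvSplitNL rest := by
          cases h : pvSplitNL rest with
          | nil => rfl
          | cons a as => simp [List.modifyHead]
        rw [this]
        simp [pvSplitNL, hc, List.modifyHead]
      · rw [if_neg (by simp [List.isPrefixOf]; exact fun h => absurd h.symm hc)]
        rw [ih rest (c :: cur) acc (by simp at hf ⊢; omega)]
        cases h : pvSplitNL rest with
        | nil => exact absurd h (pvSplitNL_ne_nil rest)
        | cons a as =>
          simp [pvSplitNL, hc, h, List.modifyHead]

lemma pvSplitOn_eq (cs : List Char) :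
    PySem.Chars.splitOn cs ['\n'] = pvSplitNL cs := by
  unfold PySem.Chars.splitOn
  rw [pvGo_eq cs (cs.length + 1) [] [] (by omega)]
  cases h : pvSplitNL cs with
  | nil => exact absurd h (pvSplitNL_ne_nil cs)
  | cons a as => simp [List.modifyHead]

/-- Bridge: A's span prefix sums are exactly B's recorded newline positions. -/
lemma pvBridge (cs : List Char) (k c : Int) :
    pvSpec ((pvSplitNL cs).map (fun l => (l.length : Int) + 1)) c k
      = (c, k) :: pvScan (PySem.List.enumerate cs k) (c + 1) := by
  induction cs generalizing k c with
  | nil => simp [pvSplitNL, pvSpec, PySem.List.enumerate_nil, pvScan]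
  | cons ch rest ih =>
    by_cases hc : ch = '\n'
    · simp only [pvSplitNL, if_pos hc, List.map_cons, pvSpec,
        PySem.List.enumerate_cons, pvScan]
      rw [show k + ((([] : List Char).length : Int) + 1) = k + 1 by simp]
      rw [ih (k + 1) (c + 1)]
    · cases h : pvSplitNL rest with
      | nil => exact absurd h (pvSplitNL_ne_nil rest)
      | cons a as =>
        simp only [pvSplitNL, if_neg hc, h, List.modifyHead, List.map_cons, pvSpec,
          PySem.List.enumerate_cons, pvScan]
        have := ih (k + 1) c
        rw [h] at this
        simp only [List.map_cons, pvSpec] at this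
        have h2 : pvSpec (as.map (fun l => (l.length : Int) + 1)) (c + 1) (k + 1 + ((a.length : Int) + 1))
            = pvScan (PySem.List.enumerate rest (k + 1)) (c + 1) := by
          injection this
        rw [show k + (((ch :: a).length : Int) + 1) = k + 1 + ((a.length : Int) + 1) by
          push_cast [List.length_cons]; ring, h2]

-- ===== VERDICT (by name: the statement is the Claim_ definition above) =====
theorem charPerLine_spec : Claim_equal_charPerLine := by
  intro my_text _
  unfold Spec_charPerLine charPerLine charPerLine_alt
  have hsplit : (PySem.Str.split? my_text "\n").getD []
      = (pvSplitNL my_text.toList).map String.ofList := by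
    show (Option.map (fun x => List.map String.ofList x)
      (PySem.Chars.split? my_text.toList "\n".toList)).getD [] = _
    have : "\n".toList = ['\n'] := rfl
    rw [this]
    simp [PySem.Chars.split?, pvSplitOn_eq]
  rw [hsplit,
    pvA_loop ((pvSplitNL my_text.toList).map String.ofList) PySem.Dict.empty 1 0 (by simp),
    pvB_loop (PySem.List.enumerate my_text.toList 0)
      ((PySem.Dict.empty : PySem.Dict Int Int).insert 1 0) 2
      (by
        intro k hk
        rcases (PySem.Dict.mem_keys_insert PySem.Dict.empty 1 k 0).mp hk with rfl | hk'
        · omega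
        · simp at hk')]
  have hmap : ((pvSplitNL my_text.toList).map String.ofList).map (fun l => PySem.Str.len l + 1)
      = (pvSplitNL my_text.toList).map (fun l => (l.length : Int) + 1) := by
    rw [List.map_map]
    refine List.map_congr_left ?_
    intro l _
    simp [PySem.Str.len]
  rw [hmap, pvBridge my_text.toList 0 1]
  have : ((PySem.Dict.empty : PySem.Dict Int Int).insert 1 0).items = [((1 : Int), (0 : Int))] := by
    decide
  have he : (PySem.Dict.empty : PySem.Dict Int Int).items = [] := by decide
  simp [this, he]
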